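-- pv_equiv track=rewrite | github.com/kavvkon/enlopy | enlopy/stats.py | get_rle
-- ===== SOURCE A (Python) =====
-- from itertools import groupby
--
-- def get_rle(x, a):
--     """Run length encoding algorithm.
--     >>> get_rle("aaaaaaaaaaaaaaaaahhhh,,,,iuuuuuuiiaaalllaaa","a")
--     [17, 3, 3]
--     """
--     if len(x) == 0:
--         return [0]
--     else:
--         res = [len(list(group))
--                for value, group in groupby(x)
--                if value == a]
--         return res if len(res) > 0 else [0]
-- ===== SOURCE B (Python) =====
-- def get_rle(x, a):
--     if len(x) == 0:
--         return [0]
--     n = len(x)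
--     m = [c == a for c in x]
--     starts = [i for i in range(n) if m[i] and (i == 0 or not m[i - 1])]
--     ends = [i for i in range(n) if m[i] and (i == n - 1 or not m[i + 1])]
--     res = [e - s + 1 for s, e in zip(starts, ends)]
--     return res if res else [0]
-- ===== Notes on version B (the rewrite author's own statement) =====
-- stated objective: alternative
-- what changed: Replaces the single itertools.groupby grouping pass with a staged boundary-detection computation: build the boolean match mask, extract the lists of run-start and run-end indices by neighbour comparison, and obtain each run length as end - start + 1 via zip.
import Mathlib
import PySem

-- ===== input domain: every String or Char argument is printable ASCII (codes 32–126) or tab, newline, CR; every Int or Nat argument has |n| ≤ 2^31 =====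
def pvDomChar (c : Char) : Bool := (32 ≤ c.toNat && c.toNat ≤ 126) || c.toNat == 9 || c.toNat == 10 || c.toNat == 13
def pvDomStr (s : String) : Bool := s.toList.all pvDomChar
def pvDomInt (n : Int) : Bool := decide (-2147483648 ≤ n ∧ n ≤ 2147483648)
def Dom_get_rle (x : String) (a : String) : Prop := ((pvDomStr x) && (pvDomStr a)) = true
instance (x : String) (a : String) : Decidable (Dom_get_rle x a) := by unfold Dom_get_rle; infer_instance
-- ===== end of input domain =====

-- B replaces the single grouping pass (itertools.groupby + comprehension) by a staged
-- boundary-detection computation: a boolean mask, the lists of run-start and run-end indices,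
-- and the run lengths as index differences (alternative decomposition, same O(n) cost).
-- Python's `c == a` (1-char string vs string) is ported as `a.toList = [c]`, which is exact.

-- ===== PORT A =====
-- groupby(x): left-to-right grouping of consecutive equal characters into (value, length) pairs
def pvGo (c : Char) (n : Int) : List Char → List (Char × Int)
  | [] => [(c, n)]
  | d :: rest => if d = c then pvGo c (n + 1) rest else (c, n) :: pvGo d 1 rest

def pvGroupby : List Char → List (Char × Int)
  | [] => []
  | c :: rest => pvGo c 1 rest

def get_rle (x : String) (a : String) : List Int :=
  if PySem.Str.len x = 0 then [0]
  else
    let res := ((pvGroupby x.toList).filter (fun p => decide (a.toList = [p.1]))).map Prod.snd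
    if res.length > 0 then res else [0]

-- ===== PORT B =====
-- mask m[i] = (x[i] == a); starts = indices where a True stretch begins; ends = where one stops;
-- run lengths are end - start + 1
def pvMask (a : String) (l : List Char) : List Bool :=
  l.map (fun c => decide (a.toList = [c]))

def get_rle_alt (x : String) (a : String) : List Int :=
  if PySem.Str.len x = 0 then [0]
  else
    let l := x.toList
    let n := l.length
    let m := pvMask a l
    let starts := (List.range n).filter (fun i => m.getD i false && (i == 0 || !(m.getD (i - 1) false)))
    let ends := (List.range n).filter (fun i => m.getD i false && (i == n - 1 || !(m.getD (i + 1) false)))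
    let res := (starts.zip ends).map (fun p => (p.2 : Int) - (p.1 : Int) + 1)
    if res = [] then [0] else res

-- ===== PRECONDITION & SPEC =====
def Spec_get_rle (x : String) (a : String) (out : List Int) : Prop := out = get_rle_alt x a
instance (x : String) (a : String) (out : List Int) : Decidable (Spec_get_rle x a out) := by unfold Spec_get_rle; infer_instance

-- ===== CLAIM (what is proved, stated in full; the proofs are below) =====
def Claim_equal_get_rle : Prop := ∀ (x : String) (a : String), Dom_get_rle x a → Spec_get_rle x a (get_rle x a)

-- ===== LEMMAS AND PROOFS =====

-- recursive characterisations of B's range-filters and of the zipped differences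
def pvSAux (prev : Bool) : List Bool → List Nat
  | [] => []
  | b :: r => (if b && !prev then [0] else []) ++ (pvSAux b r).map (· + 1)

def pvEAux : List Bool → List Nat
  | [] => []
  | b :: r => (if b && ((0 == r.length) || !(r.getD 0 false)) then [0] else []) ++ (pvEAux r).map (· + 1)

-- run lengths of True-stretches, with a pending count
def pvTr : Int → List Bool → List Int
  | n, [] => if n = 0 then [] else [n]
  | n, b :: r => if b then pvTr (n + 1) r else (if n = 0 then [] else [n]) ++ pvTr 0 r

def pvZip (s e : List Nat) : List Int :=
  (s.zip e).map (fun p => (p.2 : Int) - (p.1 : Int) + 1)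

theorem pvZip_cons (a b : Nat) (s e : List Nat) :
    pvZip (a :: s) (b :: e) = ((b : Int) - (a : Int) + 1) :: pvZip s e := by
  simp [pvZip]

theorem pvZip_shift (s : List Nat) : ∀ (e : List Nat) (k : Nat),
    pvZip (s.map (· + k)) (e.map (· + k)) = pvZip s e := by
  induction s with
  | nil => intro e k; simp [pvZip]
  | cons a s ih =>
    intro e k
    cases e with
    | nil => simp [pvZip]
    | cons b e =>
      simp only [List.map_cons, pvZip_cons, ih]
      congr 1
      push_cast
      ring

theorem pv_filter_range_cons (p : Nat → Bool) (n : Nat) :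
    (List.range (n + 1)).filter p
      = (if p 0 then [0] else []) ++ ((List.range n).filter (p ∘ Nat.succ)).map Nat.succ := by
  rw [List.range_succ_eq_map, List.filter_cons, List.filter_map]
  cases h : p 0
  · simp
  · simp

theorem pv_map_succ (L : List Nat) : L.map Nat.succ = L.map (· + 1) := rfl

-- the starts filter equals pvSAux
theorem pv_sfilter (m : List Bool) : ∀ (prev : Bool),
    (List.range m.length).filter
      (fun i => m.getD i false && (if i = 0 then !prev else !(m.getD (i - 1) false)))
      = pvSAux prev m := by
  induction m with
  | nil => intro prev; simp [pvSAux]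
  | cons b r ih =>
    intro prev
    rw [List.length_cons, pv_filter_range_cons]
    have hp : ∀ i ∈ List.range r.length,
        ((fun i => (b :: r).getD i false && (if i = 0 then !prev else !((b :: r).getD (i - 1) false))) ∘ Nat.succ) i
        = (fun i => r.getD i false && (if i = 0 then !b else !(r.getD (i - 1) false))) i := by
      intro i _
      cases i with
      | zero => simp
      | succ j => simp
    rw [List.filter_congr hp, ih b, pv_map_succ]
    rfl

-- the ends filter equals pvEAux
theorem pv_efilter (m : List Bool) :
    (List.range m.length).filter
      (fun i => m.getD i false && (i == m.length - 1 || !(m.getD (i + 1) false)))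
      = pvEAux m := by
  induction m with
  | nil => simp [pvEAux]
  | cons b r ih =>
    rw [List.length_cons, pv_filter_range_cons]
    have hp : ∀ i ∈ List.range r.length,
        ((fun i => (b :: r).getD i false && (i == r.length + 1 - 1 || !((b :: r).getD (i + 1) false))) ∘ Nat.succ) i
        = (fun i => r.getD i false && (i == r.length - 1 || !(r.getD (i + 1) false))) i := by
      intro i hi
      have hlt : i < r.length := List.mem_range.mp hi
      have hbq : (i + 1 == r.length + 1 - 1) = (i == r.length - 1) := by
        show (i + 1 == r.length) = (i == r.length - 1)
        have hiff : (i + 1 = r.length) ↔ (i = r.length - 1) := by omega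
        by_cases h : i + 1 = r.length
        · have hl : (i + 1 == r.length) = true := by simpa using h
          have hr : (i == r.length - 1) = true := by simpa using hiff.mp h
          rw [hl, hr]
        · have hl : (i + 1 == r.length) = false := by simpa using h
          have hr : (i == r.length - 1) = false := by
            simpa using fun hh => h (hiff.mpr hh)
          rw [hl, hr]
      simp only [Function.comp_apply, List.getD_cons_succ, hbq]
    rw [List.filter_congr hp, ih, pv_map_succ]
    rfl

-- core equivalence: zipped starts/ends index differences = true-run lengths,
-- with an in-run generalisation (pending run of length j, its start already recorded at 0)
theorem pv_core (m : List Bool) :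
    (pvZip (pvSAux false m) (pvEAux m) = pvTr 0 m) ∧
    (∀ j : Nat, 1 ≤ j →
      pvZip (0 :: (pvSAux true m).map (· + j))
        ((if ((0 == m.length) || !(m.getD 0 false)) then [j - 1] else []) ++ (pvEAux m).map (· + j))
        = pvTr (j : Int) m) := by
  induction m with
  | nil =>
    constructor
    · simp [pvSAux, pvEAux, pvTr, pvZip]
    · intro j hj
      have hj0 : ¬ ((j : Int) = 0) := by omega
      show (((j - 1 : Nat) : Int) - ((0 : Nat) : Int) + 1) :: ([] : List Int) = pvTr (j : Int) []
      rw [show pvTr (j : Int) [] = if (j : Int) = 0 then [] else [(j : Int)] from rfl, if_neg hj0]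
      congr 1
      omega
  | cons b r ih =>
    obtain ⟨ihZ, ihC⟩ := ih
    constructor
    · cases b with
      | false =>
        have hs : pvSAux false (false :: r) = (pvSAux false r).map (· + 1) := by simp [pvSAux]
        have he : pvEAux (false :: r) = (pvEAux r).map (· + 1) := by simp [pvEAux]
        rw [hs, he, pvZip_shift, ihZ]
        simp [pvTr]
      | true =>
        have hs : pvSAux false (true :: r) = 0 :: (pvSAux true r).map (· + 1) := by simp [pvSAux]
        have he : pvEAux (true :: r)
            = (if ((0 == r.length) || !(r.getD 0 false)) then [0] else []) ++ (pvEAux r).map (· + 1) := rfl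
        rw [hs, he]
        have key := ihC 1 (le_refl 1)
        simpa [pvTr] using key
    · intro j hj
      have hj0 : ¬ ((j : Int) = 0) := by omega
      cases b with
      | false =>
        have hs : pvSAux true (false :: r) = (pvSAux false r).map (· + 1) := by simp [pvSAux]
        have he : pvEAux (false :: r) = (pvEAux r).map (· + 1) := by simp [pvEAux]
        have hg : ((0 == (false :: r : List Bool).length) || !((false :: r : List Bool).getD 0 false)) = true := by
          simp
        rw [hs, he, hg, if_pos rfl]
        rw [List.map_map, List.map_map]
        have hcomp : ((· + j) ∘ (· + 1) : Nat → Nat) = (· + (1 + j)) := by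
          funext i; simp; omega
        rw [hcomp, List.singleton_append, pvZip_cons, pvZip_shift, ihZ]
        have ht : pvTr (j : Int) (false :: r) = ((j : Int)) :: pvTr 0 r := by
          rw [show pvTr (j : Int) (false :: r)
              = (if (j : Int) = 0 then [] else [(j : Int)]) ++ pvTr 0 r from rfl, if_neg hj0]
          rfl
        rw [ht]
        congr 1
        omega
      | true =>
        have hs : pvSAux true (true :: r) = (pvSAux true r).map (· + 1) := by simp [pvSAux]
        have he : pvEAux (true :: r)
            = (if ((0 == r.length) || !(r.getD 0 false)) then [0] else []) ++ (pvEAux r).map (· + 1) := rfl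
        have hg : ((0 == (true :: r : List Bool).length) || !((true :: r : List Bool).getD 0 false)) = false := by
          simp
        rw [hs, he, hg]
        simp only [Bool.false_eq_true, if_false, List.nil_append]
        rw [List.map_append, List.map_map, List.map_map]
        have hcomp : ((· + j) ∘ (· + 1) : Nat → Nat) = (· + (j + 1)) := by
          funext i; simp; omega
        rw [hcomp]
        have hif : ((if ((0 == r.length) || !(r.getD 0 false)) then [0] else []).map (· + j) : List Nat)
            = (if ((0 == r.length) || !(r.getD 0 false)) then [(j + 1) - 1] else []) := by
          cases hG : ((0 == r.length) || !(r.getD 0 false))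
          · simp
          · simp
        rw [hif]
        have key := ihC (j + 1) (by omega)
        rw [key]
        have ht : pvTr (j : Int) (true :: r) = pvTr ((j : Int) + 1) r := by simp [pvTr]
        rw [ht]
        norm_cast

-- A's side: filtered groupby lengths = true-run lengths of the mask
theorem pv_aside (a : String) (rest : List Char) : ∀ (c : Char) (n : Int), 0 < n →
    ((pvGo c n rest).filter (fun p => decide (a.toList = [p.1]))).map Prod.snd
      = pvTr (if a.toList = [c] then n else 0) (pvMask a rest) := by
  induction rest with
  | nil =>
    intro c n hn
    by_cases h : a.toList = [c]
    · simp [pvGo, pvMask, pvTr, List.filter, h]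
      omega
    · simp [pvGo, pvMask, pvTr, List.filter, h]
  | cons d rest ih =>
    intro c n hn
    simp only [pvGo, pvMask, List.map_cons]
    by_cases hdc : d = c
    · subst hdc
      rw [if_pos rfl]
      rw [ih d (n + 1) (by omega)]
      by_cases h : a.toList = [d]
      · rw [if_pos h, if_pos h, show (decide (a.toList = [d])) = true from by simp [h]]
        rfl
      · rw [if_neg h, if_neg h, show (decide (a.toList = [d])) = false from by simp [h]]
        rfl
    · rw [if_neg hdc]
      rw [List.filter_cons]
      by_cases hc : a.toList = [c]
      · have hd : ¬ a.toList = [d] := by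
          intro hh
          exact hdc (by
            have := hc.symm.trans hh
            simpa using this.symm)
        have hn0 : ¬ (n = 0) := by omega
        rw [if_pos (by simp [hc]), List.map_cons, ih d 1 (by omega)]
        rw [if_neg hd, if_pos hc, show (decide (a.toList = [d])) = false from by simp [hd]]
        show n :: pvTr 0 (pvMask a rest) = pvTr n (false :: pvMask a rest)
        rw [show pvTr n (false :: pvMask a rest)
            = (if n = 0 then [] else [n]) ++ pvTr 0 (pvMask a rest) from rfl, if_neg hn0]
        rfl
      · rw [if_neg (by simp [hc]), ih d 1 (by omega), if_neg hc]
        by_cases hd : a.toList = [d]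
        · rw [if_pos hd, show (decide (a.toList = [d])) = true from by simp [hd]]
          rfl
        · rw [if_neg hd, show (decide (a.toList = [d])) = false from by simp [hd]]
          rfl

theorem pv_tail (r : List Int) : (if r.length > 0 then r else [0]) = (if r = [] then [0] else r) := by
  cases r <;> simp

theorem pv_len_toList (x : String) : PySem.Str.len x ≠ 0 → x.toList ≠ [] := by
  intro h hnil
  apply h
  simp [PySem.Str.len_eq, hnil]

-- ===== VERDICT (by name: the statement is the Claim_ definition above) =====
theorem get_rle_spec : Claim_equal_get_rle := by
  intro x a _
  show get_rle x a = get_rle_alt x a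
  unfold get_rle get_rle_alt
  by_cases h : PySem.Str.len x = 0
  · rw [if_pos h, if_pos h]
  · rw [if_neg h, if_neg h]
    have hne := pv_len_toList x h
    have hlen : (pvMask a x.toList).length = x.toList.length := by simp [pvMask]
    have hstart :
        (List.range x.toList.length).filter
          (fun i => (pvMask a x.toList).getD i false && (i == 0 || !((pvMask a x.toList).getD (i - 1) false)))
          = pvSAux false (pvMask a x.toList) := by
      rw [← pv_sfilter (pvMask a x.toList) false, hlen]
      apply List.filter_congr
      intro i _
      cases i with
      | zero => simp
      | succ j => simp
    have hend :
        (List.range x.toList.length).filter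
          (fun i => (pvMask a x.toList).getD i false && (i == x.toList.length - 1 || !((pvMask a x.toList).getD (i + 1) false)))
          = pvEAux (pvMask a x.toList) := by
      rw [← pv_efilter (pvMask a x.toList), hlen]
    simp only [hstart, hend]
    have hB : pvZip (pvSAux false (pvMask a x.toList)) (pvEAux (pvMask a x.toList))
        = pvTr 0 (pvMask a x.toList) := (pv_core (pvMask a x.toList)).1
    have hA : ((pvGroupby x.toList).filter (fun p => decide (a.toList = [p.1]))).map Prod.snd
        = pvTr 0 (pvMask a x.toList) := by
      cases hl : x.toList with
      | nil => exact absurd hl hne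
      | cons c t =>
        simp only [pvGroupby, pvMask, List.map_cons]
        rw [pv_aside a t c 1 (by omega)]
        by_cases hc : a.toList = [c]
        · rw [if_pos hc, show (decide (a.toList = [c])) = true from by simp [hc]]
          rfl
        · rw [if_neg hc, show (decide (a.toList = [c])) = false from by simp [hc]]
          rfl
    rw [pv_tail]
    show (if _ = ([] : List Int) then _ else _) = _
    rw [hA, ← hB]
    rfl
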